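-- pv_equiv track=rewrite | github.com/DreamyDreamss/Algorithm_Study | 프로그래머스/기사단원의 무기/source.py | solution
-- ===== SOURCE A (Python) =====
-- def solution(number, limit, power):
--     answer = 0
--     for i in range(1,number+1):
--         n_count=0
--         if i == 1:
--             n_count = 1
--         elif i == 2 or i == 3:
--             n_count = 2
--         else:
--             for j in range(1,int(i**(1/2)+1)):
--                 if i%j==0:
--                     if j*j == i:
--                         n_count += 1
--                     else:
--                      n_count += 2
--         if n_count > limit:
--             answer += power
--         else:
--             answer += n_count
--
--     return answer
-- ===== SOURCE B (Python) =====
-- def solution(number, limit, power):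
--     # Divisor-counting sieve: one pass over multiples instead of per-i trial division.
--     if number < 1:
--         return 0
--     counts = [0] * (number + 1)
--     for d in range(1, number + 1):
--         for m in range(d, number + 1, d):
--             counts[m] += 1
--     return sum(c if c <= limit else power for c in counts[1:])
-- ===== Notes on version B (the rewrite author's own statement) =====
-- stated objective: faster
-- what changed: Replaces per-number trial division up to sqrt(i) by a single divisor-counting sieve over multiples (counts[m]+=1 for every multiple m of every d), then applies the limit/power cap in one pass.
import Mathlib
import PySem

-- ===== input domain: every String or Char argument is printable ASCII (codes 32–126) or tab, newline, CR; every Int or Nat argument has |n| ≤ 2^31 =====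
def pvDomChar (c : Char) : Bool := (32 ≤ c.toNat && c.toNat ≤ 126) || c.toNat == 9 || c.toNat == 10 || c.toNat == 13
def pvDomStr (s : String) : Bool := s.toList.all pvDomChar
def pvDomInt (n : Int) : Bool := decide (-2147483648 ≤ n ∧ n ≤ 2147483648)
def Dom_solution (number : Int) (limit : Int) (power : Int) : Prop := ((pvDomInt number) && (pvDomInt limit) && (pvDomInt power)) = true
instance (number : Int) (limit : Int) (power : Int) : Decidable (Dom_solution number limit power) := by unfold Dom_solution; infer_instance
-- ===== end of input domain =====

-- B replaces per-i trial division by a divisor-counting sieve over multiples; measurably faster (asymptotic).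
-- ===== PORT A =====
-- int(i**(1/2)+1): on this branch 4 <= i <= 2^31+1, where the double computation i**0.5 is exact enough
-- that int(i**(1/2)+1) = isqrt(i)+1; ported as Nat.sqrt i.toNat + 1 (exact on that range).
def solution (number : Int) (limit : Int) (power : Int) : Int :=
  (PySem.List.pyRange 1 (number + 1) 1).foldl (fun answer i =>
    let n_count : Int :=
      if i = 1 then 1
      else if i = 2 ∨ i = 3 then 2
      else (PySem.List.pyRange 1 ((Nat.sqrt i.toNat : Int) + 1) 1).foldl
        (fun n_count j =>
          if PySem.Int.mod i j = 0 then
            if j * j = i then n_count + 1 else n_count + 2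
          else n_count) 0
    if n_count > limit then answer + power else answer + n_count) 0

-- ===== PORT B =====
-- counts[m] += 1 ported with pySetD/pyGetD; every visited index m satisfies 1 <= m <= number < len counts,
-- where these total forms agree with Python's exact indexing.
def solution_alt (number : Int) (limit : Int) (power : Int) : Int :=
  if number < 1 then 0
  else
    let counts0 : List Int := List.replicate (number + 1).toNat 0
    let counts := (PySem.List.pyRange 1 (number + 1) 1).foldl (fun counts d =>
      (PySem.List.pyRange d (number + 1) d).foldl (fun counts m =>
        PySem.List.pySetD counts m (PySem.List.pyGetD counts m 0 + 1)) counts) counts0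
    (PySem.List.slice counts (some 1) none).foldl (fun acc c => acc + (if c ≤ limit then c else power)) 0

-- ===== PRECONDITION & SPEC =====
def Spec_solution (number : Int) (limit : Int) (power : Int) (out : Int) : Prop := out = solution_alt number limit power
instance (number : Int) (limit : Int) (power : Int) (out : Int) : Decidable (Spec_solution number limit power out) := by unfold Spec_solution; infer_instance

-- ===== CLAIM (what is proved, stated in full; the proofs are below) =====
def Claim_equal_solution : Prop := ∀ (number : Int) (limit : Int) (power : Int), Dom_solution number limit power → Spec_solution number limit power (solution number limit power)

-- ===== LEMMAS AND PROOFS =====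

lemma list_sum_range {M : Type} [AddCommMonoid M] (n : ℕ) (f : ℕ → M) :
    ((List.range n).map f).sum = ∑ k ∈ Finset.range n, f k := rfl

lemma card_gt_eq_card_lt (n : ℕ) (hn : 1 ≤ n) :
    (n.divisors.filter (fun j => n < j * j)).card
      = (n.divisors.filter (fun j => j * j < n)).card := by
  apply Finset.card_bij' (fun j _ => n / j) (fun e _ => n / e)
  · intro j hj
    simp only [Finset.mem_filter, Nat.mem_divisors] at hj ⊢
    obtain ⟨⟨⟨c, hc⟩, hne⟩, hlt⟩ := hj
    have hj0 : 0 < j := by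
      rcases Nat.eq_zero_or_pos j with h | h
      · subst h; simp at hc; omega
      · exact h
    have hdiv : n / j = c := by rw [hc, Nat.mul_div_cancel_left _ hj0]
    refine ⟨⟨⟨j, by rw [hdiv, hc]; ring⟩, hne⟩, ?_⟩
    rw [hdiv]
    nlinarith [Nat.pos_of_ne_zero hne]
  · intro e he
    simp only [Finset.mem_filter, Nat.mem_divisors] at he ⊢
    obtain ⟨⟨⟨c, hc⟩, hne⟩, hlt⟩ := he
    have he0 : 0 < e := by
      rcases Nat.eq_zero_or_pos e with h | h
      · subst h; simp at hc; omega
      · exact h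
    have hdiv : n / e = c := by rw [hc, Nat.mul_div_cancel_left _ he0]
    refine ⟨⟨⟨e, by rw [hdiv, hc]; ring⟩, hne⟩, ?_⟩
    rw [hdiv]
    nlinarith [Nat.pos_of_ne_zero hne]
  · intro j hj
    simp only [Finset.mem_filter, Nat.mem_divisors] at hj
    exact Nat.div_div_self hj.1.1 hj.1.2
  · intro e he
    simp only [Finset.mem_filter, Nat.mem_divisors] at he
    exact Nat.div_div_self he.1.1 he.1.2

lemma card_small (n : ℕ) (hn : 1 ≤ n) :
    ((Finset.range (Nat.sqrt n)).filter (fun k => (k + 1) ∣ n)).card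
      = (n.divisors.filter (fun j => j * j ≤ n)).card := by
  refine Finset.card_bij' (fun k _ => k + 1) (fun j _ => j - 1) ?_ ?_ ?_ ?_
  · intro k hk
    simp only [Finset.mem_filter, Finset.mem_range, Nat.mem_divisors] at hk ⊢
    refine ⟨⟨hk.2, by omega⟩, ?_⟩
    have : k + 1 ≤ Nat.sqrt n := by omega
    exact Nat.le_sqrt.mp this
  · intro j hj
    simp only [Finset.mem_filter, Finset.mem_range, Nat.mem_divisors] at hj ⊢
    obtain ⟨⟨hdvd, hne⟩, hle⟩ := hj
    have hj1 : 1 ≤ j := Nat.pos_of_dvd_of_pos hdvd (by omega)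
    have : j ≤ Nat.sqrt n := Nat.le_sqrt.mpr hle
    constructor
    · omega
    · rwa [Nat.sub_add_cancel hj1]
  · intro k _; show k + 1 - 1 = k; omega
  · intro j hj
    simp only [Finset.mem_filter, Nat.mem_divisors] at hj
    have : 1 ≤ j := Nat.pos_of_dvd_of_pos hj.1.1 (by omega)
    show j - 1 + 1 = j; omega

lemma card_small_strict (n : ℕ) (hn : 1 ≤ n) :
    ((Finset.range (Nat.sqrt n)).filter (fun k => (k + 1) ∣ n ∧ ¬(k + 1) * (k + 1) = n)).card
      = (n.divisors.filter (fun j => j * j < n)).card := by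
  refine Finset.card_bij' (fun k _ => k + 1) (fun j _ => j - 1) ?_ ?_ ?_ ?_
  · intro k hk
    simp only [Finset.mem_filter, Finset.mem_range, Nat.mem_divisors] at hk ⊢
    refine ⟨⟨hk.2.1, by omega⟩, ?_⟩
    have h2 : (k + 1) * (k + 1) ≤ n := Nat.le_sqrt.mp (by omega)
    have := hk.2.2
    omega
  · intro j hj
    simp only [Finset.mem_filter, Finset.mem_range, Nat.mem_divisors] at hj ⊢
    obtain ⟨⟨hdvd, hne⟩, hlt⟩ := hj
    have hj1 : 1 ≤ j := Nat.pos_of_dvd_of_pos hdvd (by omega)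
    have hle : j ≤ Nat.sqrt n := Nat.le_sqrt.mpr (le_of_lt hlt)
    refine ⟨by omega, ?_, ?_⟩
    · rwa [Nat.sub_add_cancel hj1]
    · rw [Nat.sub_add_cancel hj1]; omega
  · intro k _; show k + 1 - 1 = k; omega
  · intro j hj
    simp only [Finset.mem_filter, Nat.mem_divisors] at hj
    have : 1 ≤ j := Nat.pos_of_dvd_of_pos hj.1.1 (by omega)
    show j - 1 + 1 = j; omega

lemma core_sqrt_count (n : ℕ) (hn : 1 ≤ n) :
    ((List.range (Nat.sqrt n)).map
      (fun k => if (k + 1) ∣ n then (if (k + 1) * (k + 1) = n then (1 : Int) else 2) else 0)).sum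
      = (n.divisors.card : Int) := by
  rw [list_sum_range]
  have hpt : ∀ k : ℕ,
      (if (k + 1) ∣ n then (if (k + 1) * (k + 1) = n then (1 : Int) else 2) else 0)
        = (if (k + 1) ∣ n then (1 : Int) else 0)
          + (if (k + 1) ∣ n ∧ ¬(k + 1) * (k + 1) = n then (1 : Int) else 0) := by
    intro k
    by_cases hd : (k + 1) ∣ n <;> by_cases hq : (k + 1) * (k + 1) = n <;> simp [hd, hq]
  rw [Finset.sum_congr rfl (fun k _ => hpt k), Finset.sum_add_distrib,
    Finset.sum_boole, Finset.sum_boole]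
  rw [card_small n hn, card_small_strict n hn]
  have htot := Finset.card_filter_add_card_filter_not (s := n.divisors) (p := fun j => j * j ≤ n)
  have hgt : (n.divisors.filter (fun j => ¬ j * j ≤ n)).card
      = (n.divisors.filter (fun j => j * j < n)).card := by
    have hcg : n.divisors.filter (fun j => ¬ j * j ≤ n) = n.divisors.filter (fun j => n < j * j) :=
      Finset.filter_congr (by intro j _; simp)
    rw [hcg]
    exact card_gt_eq_card_lt n hn
  push_cast
  omega

def dc (i : Int) : Int := ((i.toNat.divisors.card : Nat) : Int)

lemma keyA (i : Int) (hi : 1 ≤ i) :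
    (if i = 1 then (1 : Int)
     else if i = 2 ∨ i = 3 then 2
     else (PySem.List.pyRange 1 ((Nat.sqrt i.toNat : Int) + 1) 1).foldl
        (fun n_count j =>
          if PySem.Int.mod i j = 0 then
            if j * j = i then n_count + 1 else n_count + 2
          else n_count) 0) = dc i := by
  have hinner : (PySem.List.pyRange 1 ((Nat.sqrt i.toNat : Int) + 1) 1).foldl
        (fun n_count j =>
          if PySem.Int.mod i j = 0 then
            if j * j = i then n_count + 1 else n_count + 2
          else n_count) 0 = dc i := by
    have hf : (fun (c : Int) (j : Int) =>
          if PySem.Int.mod i j = 0 then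
            if j * j = i then c + 1 else c + 2
          else c)
        = fun c j => c + (if PySem.Int.mod i j = 0 then (if j * j = i then (1 : Int) else 2) else 0) := by
      funext c j
      by_cases h1 : PySem.Int.mod i j = 0 <;> by_cases h2 : j * j = i <;> simp [h1, h2]
    rw [hf, PySem.List.foldl_add, PySem.List.pyRange_one, List.map_map]
    have hsimp : ((Nat.sqrt i.toNat : Int) + 1 - 1).toNat = Nat.sqrt i.toNat := by omega
    rw [hsimp]
    have hn : i = ((i.toNat : ℕ) : Int) := by omega
    set n := i.toNat with hdef
    have hn1 : 1 ≤ n := by omega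
    have hpt : ∀ k : ℕ,
        ((fun j => if PySem.Int.mod i j = 0 then (if j * j = i then (1 : Int) else 2) else 0) ∘ fun k : ℕ => 1 + (k : Int)) k
          = (fun k => if (k + 1) ∣ n then (if (k + 1) * (k + 1) = n then (1 : Int) else 2) else 0) k := by
      intro k
      simp only [Function.comp_apply, PySem.Int.mod_eq_zero_iff_dvd]
      have h1 : (1 + (k : Int)) = ((k + 1 : ℕ) : Int) := by push_cast; ring
      rw [h1, hn]
      have hdvd : (((k + 1 : ℕ) : Int)) ∣ ((n : ℕ) : Int) ↔ (k + 1) ∣ n := Int.natCast_dvd_natCast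
      have hsq : ((k + 1 : ℕ) : Int) * ((k + 1 : ℕ) : Int) = ((n : ℕ) : Int) ↔ (k + 1) * (k + 1) = n := by
        constructor
        · intro h; exact_mod_cast h
        · intro h; exact_mod_cast h
      simp only [hdvd, hsq]
    rw [List.map_congr_left (fun k _ => hpt k), core_sqrt_count n hn1]
    unfold dc; rw [← hdef]; omega
  by_cases h1 : i = 1
  · subst h1; unfold dc; decide
  · rw [if_neg h1]
    by_cases h2 : i = 2 ∨ i = 3
    · rw [if_pos h2]
      rcases h2 with h | h <;> (subst h; unfold dc; decide)
    · rw [if_neg h2]; exact hinner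

def sieveStep (cs : List Int) (m : Int) : List Int :=
  PySem.List.pySetD cs m (PySem.List.pyGetD cs m 0 + 1)

lemma sieve_len (L : List Int) (cs : List Int) :
    (L.foldl sieveStep cs).length = cs.length := by
  induction L generalizing cs with
  | nil => rfl
  | cons m L ih => simp [List.foldl_cons, ih, sieveStep, PySem.List.length_pySetD]

lemma sieve_getD (L : List Int) (hL : ∀ m ∈ L, 1 ≤ m) (cs : List Int) (k : ℕ) :
    (L.foldl sieveStep cs).getD k 0
      = cs.getD k 0 + (if k < cs.length then ((L.count ((k : ℕ) : Int) : ℕ) : Int) else 0) := by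
  induction L generalizing cs with
  | nil => simp
  | cons m L ih =>
    have hm : 1 ≤ m := hL m List.mem_cons_self
    have hstep : sieveStep cs m = cs.set m.toNat (PySem.List.pyGetD cs m 0 + 1) :=
      PySem.List.pySetD_of_nonneg cs _ (by omega)
    rw [List.foldl_cons, ih (fun x hx => hL x (List.mem_cons_of_mem _ hx))]
    have hlen : (sieveStep cs m).length = cs.length := by
      rw [hstep, List.length_set]
    rw [hlen]
    by_cases hmk : m = (k : Int)
    · subst hmk
      by_cases hk : k < cs.length
      · have hget : PySem.List.pyGetD cs ((k : ℕ) : Int) 0 = cs.getD k 0 := by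
          rw [PySem.List.pyGetD_eq_getElem cs 0 (by omega) (by push_cast; omega)]
          simp [List.getD_eq_getElem?_getD, List.getElem?_eq_getElem hk]
        rw [hstep, hget]
        simp [List.getD_eq_getElem?_getD, List.getElem?_set, hk, List.count_cons]
        push_cast
        ring
      · rw [hstep]
        simp [List.getD_eq_getElem?_getD, List.getElem?_set, hk, List.getElem?_eq_none (by omega : cs.length ≤ k)]
    · have htn : m.toNat ≠ k := by omega
      rw [hstep]
      simp [List.getD_eq_getElem?_getD, List.getElem?_set, htn, List.count_cons, hmk]

lemma count_pyRange_pos (d b x : Int) (hd : 0 < d) :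
    (PySem.List.pyRange d b d).count x = if d ≤ x ∧ x < b ∧ d ∣ x then 1 else 0 := by
  have hnd : (PySem.List.pyRange d b d).Nodup := by
    rw [PySem.List.pyRange_of_pos d b hd]
    apply List.Nodup.map _ List.nodup_range
    intro a b' h
    have h' : d + d * (a : Int) = d + d * (b' : Int) := h
    have : (a : Int) = (b' : Int) := mul_left_cancel₀ (ne_of_gt hd) (by omega)
    exact_mod_cast this
  have hmem : x ∈ PySem.List.pyRange d b d ↔ d ≤ x ∧ x < b ∧ d ∣ x := by
    rw [PySem.List.mem_pyRange_iff_of_pos hd]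
    constructor
    · rintro ⟨h1, h2, h3⟩
      refine ⟨h1, h2, ?_⟩
      have := h3.add (dvd_refl d)
      simpa using this
    · rintro ⟨h1, h2, h3⟩
      exact ⟨h1, h2, h3.sub (dvd_refl d)⟩
  by_cases hx : x ∈ PySem.List.pyRange d b d
  · rw [if_pos (hmem.mp hx)]
    exact List.count_eq_one_of_mem hnd hx
  · rw [if_neg (fun hc => hx (hmem.mpr hc))]
    exact List.count_eq_zero_of_not_mem hx

def capTerm (limit power c : Int) : Int := if c ≤ limit then c else power

lemma outer_len (D : List Int) (b : Int) (cs : List Int) :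
    ((D.foldl (fun cs d => (PySem.List.pyRange d b d).foldl sieveStep cs) cs).length) = cs.length := by
  induction D generalizing cs with
  | nil => rfl
  | cons d D ih => rw [List.foldl_cons, ih, sieve_len]

lemma outer_getD (D : List Int) (hD : ∀ d ∈ D, 1 ≤ d) (b : Int) (cs : List Int) (k : ℕ) :
    ((D.foldl (fun cs d => (PySem.List.pyRange d b d).foldl sieveStep cs) cs).getD k 0)
      = cs.getD k 0
        + (if k < cs.length then
            ((D.map (fun d => (((PySem.List.pyRange d b d).count ((k : ℕ) : Int) : ℕ) : Int))).sum)
          else 0) := by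
  induction D generalizing cs with
  | nil => simp
  | cons d D ih =>
    have hd : 1 ≤ d := hD d List.mem_cons_self
    have hall : ∀ m ∈ PySem.List.pyRange d b d, 1 ≤ m := by
      intro m hm
      rw [PySem.List.mem_pyRange_iff_of_pos (by omega)] at hm
      omega
    rw [List.foldl_cons, ih (fun x hx => hD x (List.mem_cons_of_mem _ hx)),
      sieve_len, sieve_getD _ hall]
    by_cases hk : k < cs.length
    · simp only [if_pos hk, List.map_cons, List.sum_cons]
      ring
    · simp [hk]

lemma sum_ind (number : Int) (k : ℕ) (hk1 : 1 ≤ k) (hk2 : (k : Int) ≤ number) :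
    ((PySem.List.pyRange 1 (number + 1) 1).map
        (fun d => (((PySem.List.pyRange d (number + 1) d).count ((k : ℕ) : Int) : ℕ) : Int))).sum
      = dc ((k : ℕ) : Int) := by
  have hcnt : ∀ d ∈ PySem.List.pyRange 1 (number + 1) 1,
      (((PySem.List.pyRange d (number + 1) d).count ((k : ℕ) : Int) : ℕ) : Int)
        = if d ≤ (k : Int) ∧ d ∣ (k : Int) then 1 else 0 := by
    intro d hd
    rw [PySem.List.mem_pyRange_one] at hd
    rw [count_pyRange_pos d (number + 1) _ (by omega)]
    by_cases h : d ≤ (k : Int) ∧ d ∣ (k : Int)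
    · rw [if_pos ⟨h.1, by omega, h.2⟩, if_pos h]; rfl
    · rw [if_neg (fun hc => h ⟨hc.1, hc.2.2⟩), if_neg h]; rfl
  rw [List.map_congr_left hcnt, PySem.List.pyRange_one, List.map_map]
  have harg : (number + 1 - 1).toNat = number.toNat := by omega
  rw [harg, list_sum_range]
  have hpt : ∀ t : ℕ,
      ((fun d => if d ≤ (k : Int) ∧ d ∣ (k : Int) then (1 : Int) else 0) ∘ fun t : ℕ => 1 + (t : Int)) t
        = if (t + 1) ≤ k ∧ (t + 1) ∣ k then (1 : Int) else 0 := by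
    intro t
    simp only [Function.comp_apply]
    have h1 : (1 + (t : Int)) = ((t + 1 : ℕ) : Int) := by push_cast; ring
    rw [h1]
    by_cases h : (t + 1) ≤ k ∧ (t + 1) ∣ k
    · rw [if_pos ⟨by exact_mod_cast h.1, by exact_mod_cast h.2⟩, if_pos h]
    · rw [if_neg (fun hc => h ⟨by exact_mod_cast hc.1, by exact_mod_cast hc.2⟩), if_neg h]
  rw [Finset.sum_congr rfl (fun t _ => hpt t), Finset.sum_boole]
  unfold dc
  rw [Int.toNat_natCast]
  congr 1
  refine Finset.card_bij' (fun t _ => t + 1) (fun j _ => j - 1) ?_ ?_ ?_ ?_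
  · intro t ht
    simp only [Finset.mem_filter, Finset.mem_range, Nat.mem_divisors] at ht ⊢
    exact ⟨ht.2.2, by omega⟩
  · intro j hj
    simp only [Finset.mem_filter, Finset.mem_range, Nat.mem_divisors] at hj ⊢
    have hj1 : 1 ≤ j := Nat.pos_of_dvd_of_pos hj.1 (by omega)
    have hjk : j ≤ k := Nat.le_of_dvd (by omega) hj.1
    refine ⟨by omega, by omega, ?_⟩
    rw [Nat.sub_add_cancel hj1]
    exact hj.1
  · intro t _; show t + 1 - 1 = t; omega
  · intro j hj
    simp only [Nat.mem_divisors] at hj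
    have : 1 ≤ j := Nat.pos_of_dvd_of_pos hj.1 (by omega)
    show j - 1 + 1 = j; omega

def nA (i : Int) : Int :=
  if i = 1 then 1
  else if i = 2 ∨ i = 3 then 2
  else (PySem.List.pyRange 1 ((Nat.sqrt i.toNat : Int) + 1) 1).foldl
    (fun n_count j =>
      if PySem.Int.mod i j = 0 then
        if j * j = i then n_count + 1 else n_count + 2
      else n_count) 0

lemma nA_eq_dc (i : Int) (hi : 1 ≤ i) : nA i = dc i := keyA i hi

lemma solution_eq_sum (number limit power : Int) :
    solution number limit power
      = ((List.range number.toNat).map (fun t : ℕ => capTerm limit power (dc ((t : Int) + 1)))).sum := by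
  have h0 : solution number limit power
      = (PySem.List.pyRange 1 (number + 1) 1).foldl
          (fun a i => if nA i > limit then a + power else a + nA i) 0 := rfl
  have hf : (fun (a i : Int) => if nA i > limit then a + power else a + nA i)
      = fun a i => a + capTerm limit power (nA i) := by
    funext a i
    unfold capTerm
    split_ifs <;> omega
  rw [h0, hf, PySem.List.foldl_add, PySem.List.pyRange_one, List.map_map]
  have harg : (number + 1 - 1).toNat = number.toNat := by omega
  rw [harg]
  have hpt : ∀ k, k ∈ List.range number.toNat →
      ((fun i => capTerm limit power (nA i)) ∘ fun k : ℕ => 1 + (k : Int)) k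
        = capTerm limit power (dc ((k : Int) + 1)) := by
    intro k _
    simp only [Function.comp_apply]
    rw [show (1 + (k : Int)) = (k : Int) + 1 by ring, nA_eq_dc _ (by omega)]
  rw [List.map_congr_left hpt]
  exact zero_add _

lemma solution_alt_eq_sum (number limit power : Int) :
    solution_alt number limit power
      = ((List.range number.toNat).map (fun t : ℕ => capTerm limit power (dc ((t : Int) + 1)))).sum := by
  by_cases hneg : number < 1
  · unfold solution_alt
    rw [if_pos hneg]
    have : number.toNat = 0 := by omega
    rw [this]
    simp
  · simp only [solution_alt, if_neg hneg]
    have hnum : 1 ≤ number := by omega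
    set cs0 : List Int := List.replicate (number + 1).toNat 0 with hcs0
    set FL := (PySem.List.pyRange 1 (number + 1) 1).foldl (fun counts d =>
      (PySem.List.pyRange d (number + 1) d).foldl (fun counts m =>
        PySem.List.pySetD counts m (PySem.List.pyGetD counts m 0 + 1)) counts) cs0 with hFL
    have hFL' : FL = (PySem.List.pyRange 1 (number + 1) 1).foldl (fun counts d =>
        (PySem.List.pyRange d (number + 1) d).foldl sieveStep counts) cs0 := rfl
    have hlen0 : cs0.length = (number + 1).toNat := by rw [hcs0, List.length_replicate]
    have hlenFL : FL.length = (number + 1).toNat := by rw [hFL', outer_len, hlen0]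
    have hD : ∀ d ∈ PySem.List.pyRange 1 (number + 1) 1, (1 : Int) ≤ d := by
      intro d hd
      rw [PySem.List.mem_pyRange_one] at hd
      omega
    have hchar : ∀ k : ℕ, 1 ≤ k → k ≤ number.toNat → FL.getD k 0 = dc ((k : ℕ) : Int) := by
      intro k hk1 hk2
      rw [hFL', outer_getD _ hD, hlen0]
      have hk : k < (number + 1).toNat := by omega
      rw [if_pos hk, sum_ind number k hk1 (by omega)]
      have : cs0.getD k 0 = 0 := by rw [hcs0]; simp [List.getD_eq_getElem?_getD]
      rw [this, zero_add]
    -- the sliced list is exactly the dc-map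
    have hdrop : FL.drop 1 = (List.range number.toNat).map (fun t : ℕ => dc ((t : Int) + 1)) := by
      apply List.ext_getElem
      · simp [List.length_drop, hlenFL]; omega
      · intro t h1 h2
        have ht : t < number.toNat := by simp at h2; omega
        rw [List.getElem_drop]
        have hidx : 1 + t < FL.length := by omega
        have : FL[1 + t] = FL.getD (1 + t) 0 := by
          rw [List.getD_eq_getElem?_getD, List.getElem?_eq_getElem hidx]; rfl
        rw [this, hchar (1 + t) (by omega) (by omega)]
        have hR : ((List.range number.toNat).map (fun t : ℕ => dc ((t : Int) + 1)))[t]'h2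
            = dc ((t : Int) + 1) := by
          simp
        rw [hR]
        congr 1
        push_cast
        ring
    have hslice : PySem.List.slice FL (some 1) none = FL.drop 1 := by
      have := PySem.List.slice_from (xs := FL) (a := 1) (by omega)
      simpa using this
    rw [hslice, hdrop]
    have hf : (fun (acc c : Int) => acc + (if c ≤ limit then c else power))
        = fun acc c => acc + capTerm limit power c := rfl
    rw [hf, PySem.List.foldl_add, List.map_map]
    simp [Function.comp_def, capTerm]

-- ===== VERDICT (by name: the statement is the Claim_ definition above) =====
theorem solution_spec : Claim_equal_solution := by
  intro number limit power _
  unfold Spec_solution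
  rw [solution_eq_sum number limit power, solution_alt_eq_sum number limit power]
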